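-- pv_equiv track=rewrite | github.com/ringrongree/auto-audiobook | aabook/speaker_identification.py | format_sentence_with_annotations
-- ===== SOURCE A (Python) =====
-- from typing import Dict, List, Any
--
-- def format_sentence_with_annotations(
--     sentence: str,
--     emotion: str,
--     tone: str,
--     sound_events: List[Dict[str, str]],
-- ) -> str:
--     """
--     Format a sentence with inline emotion/tone and sound effect annotations.
--
--     Format: [emotion, tone] word word [sound] word word
--     """
--     # Start with emotion and tone annotation
--     formatted = f"[{emotion}, {tone}] {sentence}"
--
--     # Insert sound effects at their trigger points
--     if sound_events:
--         # Sort sound events by their position in the sentence (last to first to preserve indices)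
--         events_with_pos = []
--         for event in sound_events:
--             trigger = event.get("trigger_phrase", "")
--             sound = event.get("sound", "")
--             if trigger and sound:
--                 # Find position of trigger phrase in sentence (case-insensitive)
--                 pos = sentence.lower().find(trigger.lower())
--                 if pos != -1:
--                     # Calculate the end position of the trigger phrase
--                     end_pos = pos + len(trigger)
--                     events_with_pos.append((end_pos, sound, trigger))
--
--         # Sort by position (descending) to insert from end to start
--         events_with_pos.sort(reverse=True, key=lambda x: x[0])
--
--         # Insert sound annotations after trigger phrases
--         result = sentence
--         for end_pos, sound, trigger in events_with_pos:
--             result = result[:end_pos] + f" [{sound}]" + result[end_pos:]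
--
--         formatted = f"[{emotion}, {tone}] {result}"
--
--     return formatted
-- ===== SOURCE B (Python) =====
-- def format_sentence_with_annotations(sentence, emotion, tone, sound_events):
--     """Single forward rebuild: group sound annotations by insertion point, then
--     emit the sentence in one left-to-right pass (B; same result as A)."""
--     prefix = f"[{emotion}, {tone}] "
--     low = sentence.lower()
--     pairs = []
--     for event in sound_events:
--         trigger = event.get("trigger_phrase", "")
--         sound = event.get("sound", "")
--         if trigger and sound:
--             pos = low.find(trigger.lower())
--             if pos != -1:
--                 pairs.append((pos + len(trigger), sound))
--     groups = {}
--     for end_pos, sound in pairs: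
--         groups.setdefault(end_pos, []).append(sound)
--     parts = []
--     prev = 0
--     for p in sorted(groups):
--         parts.append(sentence[prev:p])
--         for sound in reversed(groups[p]):
--             parts.append(f" [{sound}]")
--         prev = p
--     parts.append(sentence[prev:])
--     return prefix + "".join(parts)
-- ===== Notes on version B (the rewrite author's own statement) =====
-- stated objective: alternative
-- what changed: Instead of sorting events descending and repeatedly re-slicing the growing string from end to start, B groups the annotations by insertion point in a dict and rebuilds the sentence in one ascending forward pass (emitting each group in reversed encounter order to keep A's tie semantics).
import Mathlib
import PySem

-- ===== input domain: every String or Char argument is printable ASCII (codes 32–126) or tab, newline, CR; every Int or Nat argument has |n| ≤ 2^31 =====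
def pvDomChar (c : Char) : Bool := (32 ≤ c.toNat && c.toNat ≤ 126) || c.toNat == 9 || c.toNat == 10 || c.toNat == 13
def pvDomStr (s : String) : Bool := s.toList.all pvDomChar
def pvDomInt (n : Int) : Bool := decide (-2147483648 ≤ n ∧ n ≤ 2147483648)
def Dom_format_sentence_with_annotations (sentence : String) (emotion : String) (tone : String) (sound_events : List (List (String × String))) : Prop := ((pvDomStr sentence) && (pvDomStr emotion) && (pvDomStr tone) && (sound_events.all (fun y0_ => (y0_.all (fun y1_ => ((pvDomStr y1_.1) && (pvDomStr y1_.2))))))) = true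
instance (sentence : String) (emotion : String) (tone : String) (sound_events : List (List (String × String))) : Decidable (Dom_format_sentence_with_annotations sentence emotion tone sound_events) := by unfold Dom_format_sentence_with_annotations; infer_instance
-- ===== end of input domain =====

-- B replaces A's descending sort + repeated end-to-start re-slicing by grouping the
-- annotations per insertion point and one ascending forward rebuild (alternative decomposition).

-- f" [{sound}]" as a list of chars (shared by both ports)
def pvAnnot (sound : String) : List Char := ' ' :: '[' :: (sound.toList ++ [']'])

-- ===== PORT A =====
def pvCollectA (s : List Char) (sound_events : List (List (String × String))) : List (Int × String × String) :=
  sound_events.foldl (fun acc event =>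
    let trigger := (PySem.Dict.ofList event).getD "trigger_phrase" ""
    let sound := (PySem.Dict.ofList event).getD "sound" ""
    if trigger ≠ "" ∧ sound ≠ "" then
      let pos := PySem.Chars.find (PySem.Chars.lower s) (PySem.Chars.lower trigger.toList)
      if pos ≠ -1 then acc ++ [((pos + (trigger.toList.length : Int)), sound, trigger)] else acc
    else acc) []

def pvInsertA (s : List Char) (evs : List (Int × String × String)) : List Char :=
  evs.foldl (fun r e =>
    PySem.List.slice r none (some e.1) ++ pvAnnot e.2.1 ++ PySem.List.slice r (some e.1) none) s

def format_sentence_with_annotations (sentence : String) (emotion : String) (tone : String) (sound_events : List (List (String × String))) : String :=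
  let pre := '[' :: (emotion.toList ++ (", ".toList ++ (tone.toList ++ "] ".toList)))
  if sound_events ≠ [] then
    let evs := PySem.List.sorted (pvCollectA sentence.toList sound_events) (fun x => x.1) true
    String.ofList (pre ++ pvInsertA sentence.toList evs)
  else
    String.ofList (pre ++ sentence.toList)

-- ===== PORT B =====
def pvCollectB (s : List Char) (sound_events : List (List (String × String))) : List (Int × String) :=
  let low := PySem.Chars.lower s
  sound_events.foldl (fun acc event =>
    let trigger := (PySem.Dict.ofList event).getD "trigger_phrase" ""
    let sound := (PySem.Dict.ofList event).getD "sound" ""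
    if trigger ≠ "" ∧ sound ≠ "" then
      let pos := PySem.Chars.find low (PySem.Chars.lower trigger.toList)
      if pos ≠ -1 then acc ++ [((pos + (trigger.toList.length : Int)), sound)] else acc
    else acc) []

def pvGroups (pairs : List (Int × String)) : PySem.Dict Int (List String) :=
  pairs.foldl (fun d e => d.insert e.1 (d.getD e.1 [] ++ [e.2])) PySem.Dict.empty

def pvBuildB (s : List Char) (groups : PySem.Dict Int (List String)) : List Char :=
  let ks := PySem.List.sorted groups.keys (fun x => x) false
  let st := ks.foldl (fun (st : List (List Char) × Int) p =>
      let parts := st.1 ++ [PySem.List.slice s (some st.2) (some p)]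
      let parts := ((groups.getD p []).reverse).foldl (fun ps snd => ps ++ [pvAnnot snd]) parts
      (parts, p)) ([], (0 : Int))
  (st.1 ++ [PySem.List.slice s (some st.2) none]).flatten

def format_sentence_with_annotations_alt (sentence : String) (emotion : String) (tone : String) (sound_events : List (List (String × String))) : String :=
  let pre := '[' :: (emotion.toList ++ (", ".toList ++ (tone.toList ++ "] ".toList)))
  String.ofList (pre ++ pvBuildB sentence.toList (pvGroups (pvCollectB sentence.toList sound_events)))

-- ===== PRECONDITION & SPEC =====
def Spec_format_sentence_with_annotations (sentence : String) (emotion : String) (tone : String) (sound_events : List (List (String × String))) (out : String) : Prop := out = format_sentence_with_annotations_alt sentence emotion tone sound_events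
instance (sentence : String) (emotion : String) (tone : String) (sound_events : List (List (String × String))) (out : String) : Decidable (Spec_format_sentence_with_annotations sentence emotion tone sound_events out) := by unfold Spec_format_sentence_with_annotations; infer_instance

-- ===== CLAIM (what is proved, stated in full; the proofs are below) =====
def Claim_equal_format_sentence_with_annotations : Prop := ∀ (sentence : String) (emotion : String) (tone : String) (sound_events : List (List (String × String))), Dom_format_sentence_with_annotations sentence emotion tone sound_events → Spec_format_sentence_with_annotations sentence emotion tone sound_events (format_sentence_with_annotations sentence emotion tone sound_events)

-- ===== LEMMAS AND PROOFS =====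

-- the group of sounds to be inserted at position q, in encounter order
def pvGrp (P : List (Int × String)) (q : Int) : List (Int × String) := P.filter (fun e => e.1 = q)

-- the annotation text emitted at one position (reversed encounter order)
def pvAnnots (g : List (Int × String)) : List Char := (g.reverse.map (fun e => pvAnnot e.2)).flatten

-- grouped view of a stable descending sort: blocks of equal keys, keys strictly descending
def pvG (P : List (Int × String)) (D : List Int) : List (Int × String) := D.flatMap (fun q => pvGrp P q)

-- canonical result, peeling the LARGEST position first
def pvCanon (P : List (Int × String)) (s : List Char) : List Int → List Char
  | [] => s
  | q :: D => pvCanon P (s.take q.toNat) D ++ pvAnnots (pvGrp P q) ++ s.drop q.toNat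

-- f used to forget the trigger component of A's triples
def pvF (e : Int × String × String) : Int × String := (e.1, e.2.1)

-- canonical ascending rebuild (what B computes)
def pvCanonAsc (P : List (Int × String)) (s : List Char) (prev : Int) : List Int → List Char
  | [] => s.drop prev.toNat
  | q :: E => (s.drop prev.toNat).take (q.toNat - prev.toNat) ++ pvAnnots (pvGrp P q) ++ pvCanonAsc P s q E

-- strictly-descending / strictly-ascending distinct keys of P
def pvDKeys (P : List (Int × String)) : List Int :=
  PySem.List.sorted (PySem.List.dedup (P.map (fun e => e.1))) (fun x => x) true
def pvE (P : List (Int × String)) : List Int :=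
  PySem.List.sorted (PySem.List.dedup (P.map (fun e => e.1))) (fun x => x) false

-- A's insertion loop, over pairs
def pvInsertP (s : List Char) (ps : List (Int × String)) : List Char :=
  ps.foldl (fun r e =>
    PySem.List.slice r none (some e.1) ++ pvAnnot e.2 ++ PySem.List.slice r (some e.1) none) s

-- ---- collect relation ----
lemma pvFoldAB (s : List Char) (ev : List (List (String × String))) (acc : List (Int × String × String)) :
    (ev.foldl (fun acc event =>
      if (PySem.Dict.ofList event).getD "trigger_phrase" "" ≠ "" ∧ (PySem.Dict.ofList event).getD "sound" "" ≠ "" then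
        if PySem.Chars.find (PySem.Chars.lower s) (PySem.Chars.lower ((PySem.Dict.ofList event).getD "trigger_phrase" "").toList) ≠ -1 then
          acc ++ [((PySem.Chars.find (PySem.Chars.lower s) (PySem.Chars.lower ((PySem.Dict.ofList event).getD "trigger_phrase" "").toList)
              + (((PySem.Dict.ofList event).getD "trigger_phrase" "").toList.length : Int)),
            (PySem.Dict.ofList event).getD "sound" "", (PySem.Dict.ofList event).getD "trigger_phrase" "")]
        else acc
      else acc) acc).map pvF
    = ev.foldl (fun acc event =>
      if (PySem.Dict.ofList event).getD "trigger_phrase" "" ≠ "" ∧ (PySem.Dict.ofList event).getD "sound" "" ≠ "" then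
        if PySem.Chars.find (PySem.Chars.lower s) (PySem.Chars.lower ((PySem.Dict.ofList event).getD "trigger_phrase" "").toList) ≠ -1 then
          acc ++ [((PySem.Chars.find (PySem.Chars.lower s) (PySem.Chars.lower ((PySem.Dict.ofList event).getD "trigger_phrase" "").toList)
              + (((PySem.Dict.ofList event).getD "trigger_phrase" "").toList.length : Int)),
            (PySem.Dict.ofList event).getD "sound" "")]
        else acc
      else acc) (acc.map pvF) := by
  induction ev generalizing acc with
  | nil => rfl
  | cons event rest ih =>
    simp only [List.foldl_cons]
    rw [ih]
    congr 1
    split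
    · split
      · simp [pvF]
      · rfl
    · rfl

lemma pvCollect_rel (s : List Char) (ev : List (List (String × String))) :
    (pvCollectA s ev).map pvF = pvCollectB s ev := by
  unfold pvCollectA pvCollectB
  exact pvFoldAB s ev []

lemma pvInsertA_eq_P (s : List Char) (evs : List (Int × String × String)) :
    pvInsertA s evs = pvInsertP s (evs.map pvF) := by
  unfold pvInsertA pvInsertP
  rw [List.foldl_map]
  rfl

-- ---- sorted commutes with pvF ----
lemma pvInsertBy_map (x : Int × String × String) (l : List (Int × String × String)) :
    (PySem.List.insertBy (fun a b => decide (b.1 < a.1)) x l).map pvF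
    = PySem.List.insertBy (fun a b => decide (b.1 < a.1)) (pvF x) (l.map pvF) := by
  induction l with
  | nil => rfl
  | cons y ys ih =>
    by_cases h : y.1 < x.1 <;> simp [PySem.List.insertBy, h, ih, pvF]

lemma pvSorted_map (T : List (Int × String × String)) :
    (PySem.List.sorted T (fun x => x.1) true).map pvF
    = PySem.List.sorted (T.map pvF) (fun x => x.1) true := by
  rw [PySem.List.sorted_rev_eq_foldl_insertBy, PySem.List.sorted_rev_eq_foldl_insertBy]
  suffices h : ∀ acc, (T.foldl (fun acc x => PySem.List.insertBy (fun a b => decide (b.1 < a.1)) x acc) acc).map pvF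
      = (T.map pvF).foldl (fun acc x => PySem.List.insertBy (fun a b => decide (b.1 < a.1)) x acc) (acc.map pvF) by
    exact h []
  intro acc
  induction T generalizing acc with
  | nil => rfl
  | cons y ys ih => simp only [List.foldl_cons, List.map_cons]; rw [ih, pvInsertBy_map]

-- ---- insertBy behaviour ----
lemma pvInsertBy_append_not {α : Type} (p : α → α → Bool) (x : α) (as bs : List α)
    (h : ∀ y ∈ as, p x y = false) :
    PySem.List.insertBy p x (as ++ bs) = as ++ PySem.List.insertBy p x bs := by
  induction as with
  | nil => rfl
  | cons a as ih =>
    have ha : p x a = false := h a (by simp)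
    cases bs with
    | nil =>
      simp only [List.cons_append]
      rw [show (as ++ ([] : List α)) = as from by simp] at *
      simp [PySem.List.insertBy, ha, ih (fun y hy => h y (by simp [hy]))]
    | cons b bs =>
      simp only [List.cons_append]
      simp [PySem.List.insertBy, ha, ih (fun y hy => h y (by simp [hy]))]

lemma pvInsertBy_all {α : Type} (p : α → α → Bool) (x : α) (l : List α)
    (h : ∀ y ∈ l, p x y = true) :
    PySem.List.insertBy p x l = x :: l := by
  cases l with
  | nil => rfl
  | cons a as => simp [PySem.List.insertBy, h a (by simp)]

-- ---- groups facts ----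
lemma pvGrp_append (P : List (Int × String)) (x : Int × String) (q : Int) :
    pvGrp (P ++ [x]) q = pvGrp P q ++ if x.1 = q then [x] else [] := by
  unfold pvGrp
  rw [List.filter_append]
  congr 1
  split <;> simp_all

lemma pvMem_pvGrp {P : List (Int × String)} {q : Int} {e : Int × String} (h : e ∈ pvGrp P q) :
    e.1 = q ∧ e ∈ P := by
  unfold pvGrp at h
  have := List.of_mem_filter h
  exact ⟨by simpa using this, List.mem_of_mem_filter h⟩

lemma pvMem_pvG {P : List (Int × String)} {D : List Int} {e : Int × String} (h : e ∈ pvG P D) :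
    ∃ q ∈ D, e.1 = q ∧ e ∈ P := by
  unfold pvG at h
  rcases List.mem_flatMap.1 h with ⟨q, hq, he⟩
  exact ⟨q, hq, pvMem_pvGrp he⟩

lemma pvG_congr (P P' : List (Int × String)) (D : List Int)
    (h : ∀ q ∈ D, pvGrp P' q = pvGrp P q) : pvG P' D = pvG P D := by
  unfold pvG
  induction D with
  | nil => rfl
  | cons d D ih =>
    simp only [List.flatMap_cons]
    rw [h d (by simp), ih (fun q hq => h q (by simp [hq]))]

-- ---- the two insertion-into-grouped-form lemmas ----
lemma pvINS_mem (P : List (Int × String)) (x : Int × String) (D : List Int)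
    (hD : D.Pairwise (· > ·)) (hq : x.1 ∈ D) :
    PySem.List.insertBy (fun a b => decide (b.1 < a.1)) x (pvG P D) = pvG (P ++ [x]) D := by
  induction D with
  | nil => cases hq
  | cons d D ih =>
    have hDp : D.Pairwise (· > ·) := hD.of_cons
    have hlt : ∀ r ∈ D, r < d := fun r hr => (List.pairwise_cons.1 hD).1 r hr
    by_cases hxd : x.1 = d
    · show PySem.List.insertBy _ x (pvGrp P d ++ pvG P D) = pvG (P ++ [x]) (d :: D)
      rw [pvInsertBy_append_not _ _ _ _ (fun y hy => by
        have h1 := (pvMem_pvGrp hy).1; simp [h1, hxd])]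
      rw [pvInsertBy_all _ _ _ (fun y hy => by
        rcases pvMem_pvG hy with ⟨r, hr, hy1, _⟩
        simp only [decide_eq_true_eq, hy1, hxd]
        exact hlt r hr)]
      show pvGrp P d ++ x :: pvG P D = pvGrp (P ++ [x]) d ++ pvG (P ++ [x]) D
      rw [pvGrp_append, if_pos hxd,
        pvG_congr P (P ++ [x]) D (fun q hq' => by
          rw [pvGrp_append, if_neg (by rw [hxd]; exact ne_of_gt (hlt q hq')), List.append_nil])]
      simp
    · have hxD : x.1 ∈ D := (List.mem_cons.1 hq).resolve_left hxd
      show PySem.List.insertBy _ x (pvGrp P d ++ pvG P D) = pvG (P ++ [x]) (d :: D)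
      rw [pvInsertBy_append_not _ _ _ _ (fun y hy => by
        have h1 := (pvMem_pvGrp hy).1
        have h2 : x.1 < d := hlt _ hxD
        simp only [decide_eq_false_iff_not, not_lt, h1]
        omega)]
      show pvGrp P d ++ PySem.List.insertBy _ x (pvG P D) = pvGrp (P ++ [x]) d ++ pvG (P ++ [x]) D
      rw [ih hDp hxD, pvGrp_append, if_neg hxd, List.append_nil]

lemma pvINS_new (P : List (Int × String)) (x : Int × String) (D : List Int)
    (hD : D.Pairwise (· > ·)) (hq : x.1 ∉ D) (h0 : pvGrp P x.1 = []) :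
    PySem.List.insertBy (fun a b => decide (b.1 < a.1)) x (pvG P D)
    = pvG (P ++ [x]) (PySem.List.insertBy (fun a b => decide (b < a)) x.1 D) := by
  induction D with
  | nil =>
    show [x] = pvG (P ++ [x]) [x.1]
    show [x] = pvGrp (P ++ [x]) x.1 ++ []
    rw [pvGrp_append, if_pos rfl, h0]
    simp
  | cons d D ih =>
    have hDp : D.Pairwise (· > ·) := hD.of_cons
    have hlt : ∀ r ∈ D, r < d := fun r hr => (List.pairwise_cons.1 hD).1 r hr
    have hxd : x.1 ≠ d := fun h => hq (by simp [h])
    have hxD : x.1 ∉ D := fun h => hq (by simp [h])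
    by_cases hgt : d < x.1
    · -- x goes in front of everything
      rw [pvInsertBy_all _ _ _ (fun y hy => by
        rcases pvMem_pvG (D := d :: D) hy with ⟨r, hr, hy1, _⟩
        simp only [decide_eq_true_eq, hy1]
        rcases List.mem_cons.1 hr with h | h
        · omega
        · have := hlt r h; omega)]
      have hins : PySem.List.insertBy (fun a b => decide (b < a)) x.1 (d :: D) = x.1 :: d :: D := by
        apply pvInsertBy_all
        intro y hy
        simp only [decide_eq_true_eq]
        rcases List.mem_cons.1 hy with h | h
        · omega
        · have := hlt y h; omega
      rw [hins]
      show x :: pvG P (d :: D) = pvGrp (P ++ [x]) x.1 ++ pvG (P ++ [x]) (d :: D)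
      rw [pvGrp_append, if_pos rfl, h0,
        pvG_congr P (P ++ [x]) (d :: D) (fun q hq' => by
          rw [pvGrp_append, if_neg (fun hh => hq (by rw [hh]; exact hq')), List.append_nil])]
      simp
    · have hltx : x.1 < d := by
        rcases lt_or_gt_of_ne hxd with h | h
        · exact h
        · exact absurd h hgt
      show PySem.List.insertBy _ x (pvGrp P d ++ pvG P D) = _
      rw [pvInsertBy_append_not _ _ _ _ (fun y hy => by
        have h1 := (pvMem_pvGrp hy).1
        simp only [decide_eq_false_iff_not, not_lt, h1]
        omega)]
      have hins : PySem.List.insertBy (fun a b => decide (b < a)) x.1 (d :: D)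
          = d :: PySem.List.insertBy (fun a b => decide (b < a)) x.1 D := by
        simp [PySem.List.insertBy, not_lt.2 (le_of_lt hltx)]
      rw [hins]
      show pvGrp P d ++ PySem.List.insertBy _ x (pvG P D)
          = pvGrp (P ++ [x]) d ++ pvG (P ++ [x]) (PySem.List.insertBy (fun a b => decide (b < a)) x.1 D)
      rw [ih hDp hxD, pvGrp_append, if_neg hxd, List.append_nil]

-- ---- stable grouping ----
lemma pvDedup_snoc (ys : List Int) (q : Int) :
    PySem.List.dedup (ys ++ [q])
    = if q ∈ ys then PySem.List.dedup ys else PySem.List.dedup ys ++ [q] := by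
  have h1 : PySem.List.dedup (ys ++ [q]) = PySem.Set.add (PySem.List.dedup ys) q := by
    simp [PySem.List.dedup, PySem.Set.ofList, List.foldl_append]
  rw [h1]
  by_cases h : q ∈ ys
  · simp only [PySem.Set.add, if_pos h]
    simp [PySem.Set.contains, h]
  · simp only [PySem.Set.add, if_neg h]
    simp [PySem.Set.contains, h]

lemma pvDKeys_pairwise (P : List (Int × String)) : (pvDKeys P).Pairwise (· > ·) := by
  unfold pvDKeys
  have h1 := PySem.List.sorted_pairwise_rev (PySem.List.dedup (P.map (fun e => e.1))) (fun x => x)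
  have h2 : (PySem.List.sorted (PySem.List.dedup (P.map (fun e => e.1))) (fun x => x) true).Nodup :=
    (PySem.List.sorted_perm (PySem.List.dedup (P.map (fun e => e.1))) (fun x => x) true).nodup_iff.2
      (PySem.List.nodup_dedup _)
  exact (h1.and h2).imp (fun {a b} h => lt_of_le_of_ne h.1 (Ne.symm h.2))

lemma pvMem_pvDKeys (P : List (Int × String)) (q : Int) :
    q ∈ pvDKeys P ↔ q ∈ P.map (fun e => e.1) := by
  unfold pvDKeys
  rw [PySem.List.mem_sorted, PySem.List.mem_dedup]

lemma pvStable (P : List (Int × String)) :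
    PySem.List.sorted P (fun e => e.1) true = pvG P (pvDKeys P) := by
  induction P using List.reverseRecOn with
  | nil => rfl
  | append_singleton L x ih =>
    rw [PySem.List.sorted_rev_eq_foldl_insertBy, List.foldl_append,
      ← PySem.List.sorted_rev_eq_foldl_insertBy]
    simp only [List.foldl_cons, List.foldl_nil]
    rw [ih]
    by_cases hmem : x.1 ∈ L.map (fun e => e.1)
    · have hDk : pvDKeys (L ++ [x]) = pvDKeys L := by
        unfold pvDKeys
        rw [List.map_append, List.map_cons, List.map_nil, pvDedup_snoc, if_pos hmem]
      rw [hDk]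
      exact pvINS_mem L x _ (pvDKeys_pairwise L) ((pvMem_pvDKeys L x.1).2 hmem)
    · have hDk : pvDKeys (L ++ [x])
          = PySem.List.insertBy (fun a b => decide (b < a)) x.1 (pvDKeys L) := by
        unfold pvDKeys
        rw [List.map_append, List.map_cons, List.map_nil, pvDedup_snoc, if_neg hmem,
          PySem.List.sorted_rev_eq_foldl_insertBy, List.foldl_append,
          ← PySem.List.sorted_rev_eq_foldl_insertBy]
        simp only [List.foldl_cons, List.foldl_nil]
      rw [hDk]
      exact pvINS_new L x _ (pvDKeys_pairwise L)
        (fun h => hmem ((pvMem_pvDKeys L x.1).1 h))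
        (List.filter_eq_nil_iff.2 (fun e he => by
          simp only [decide_eq_true_eq]
          exact fun h => hmem (List.mem_map.2 ⟨e, he, h⟩)))

-- ---- bounds of the collected positions ----
lemma pvCollectB_bounds (s : List Char) (ev : List (List (String × String))) :
    ∀ e ∈ pvCollectB s ev, 0 ≤ e.1 ∧ e.1 ≤ (s.length : Int) := by
  unfold pvCollectB
  suffices h : ∀ acc, (∀ e ∈ acc, 0 ≤ e.1 ∧ e.1 ≤ (s.length : Int)) →
      ∀ e ∈ ev.foldl (fun acc event =>
        if (PySem.Dict.ofList event).getD "trigger_phrase" "" ≠ "" ∧ (PySem.Dict.ofList event).getD "sound" "" ≠ "" then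
          if PySem.Chars.find (PySem.Chars.lower s) (PySem.Chars.lower ((PySem.Dict.ofList event).getD "trigger_phrase" "").toList) ≠ -1 then
            acc ++ [((PySem.Chars.find (PySem.Chars.lower s) (PySem.Chars.lower ((PySem.Dict.ofList event).getD "trigger_phrase" "").toList)
                + (((PySem.Dict.ofList event).getD "trigger_phrase" "").toList.length : Int)),
              (PySem.Dict.ofList event).getD "sound" "")]
          else acc
        else acc) acc, 0 ≤ e.1 ∧ e.1 ≤ (s.length : Int) by
    exact h [] (by simp)
  induction ev with
  | nil => exact fun acc hacc => hacc
  | cons event rest ih =>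
    intro acc hacc
    simp only [List.foldl_cons]
    apply ih
    split
    · split
      · rename_i hts hpos
        intro e he
        rcases List.mem_append.1 he with h | h
        · exact hacc e h
        · have he' : e = (PySem.Chars.find (PySem.Chars.lower s)
              (PySem.Chars.lower ((PySem.Dict.ofList event).getD "trigger_phrase" "").toList)
              + (((PySem.Dict.ofList event).getD "trigger_phrase" "").toList.length : Int),
              (PySem.Dict.ofList event).getD "sound" "") := by simpa using h
          subst he'
          generalize ((PySem.Dict.ofList event).getD "trigger_phrase" "").toList = trig at hpos ⊢
          have hge : -1 ≤ PySem.Chars.find (PySem.Chars.lower s) (PySem.Chars.lower trig) :=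
            PySem.Chars.neg_one_le_find _ _
          have h0 : 0 ≤ PySem.Chars.find (PySem.Chars.lower s) (PySem.Chars.lower trig) := by
            omega
          have hspec := (PySem.Chars.find_spec h0).1
          have hlen := hspec.length_le
          simp only [List.length_drop] at hlen
          have hlow : (PySem.Chars.lower s).length = s.length := by
            simp [PySem.Chars.lower]
          have hlowt : (PySem.Chars.lower trig).length = trig.length := by
            simp [PySem.Chars.lower]
          rw [hlow, hlowt] at hlen
          have hfl := PySem.Chars.find_le_length (PySem.Chars.lower s) (PySem.Chars.lower trig)
          rw [hlow] at hfl
          constructor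
          · simp only []
            omega
          · simp only []
            omega
      · exact fun e he => hacc e he
    · exact fun e he => hacc e he

-- ---- the descending insertion loop, characterised ----
lemma pvInsertP_cons (s : List Char) (e : Int × String) (es : List (Int × String)) :
    pvInsertP s (e :: es)
    = pvInsertP (PySem.List.slice s none (some e.1) ++ pvAnnot e.2 ++ PySem.List.slice s (some e.1) none) es := rfl

lemma pvInsertP_append (s : List Char) (a b : List (Int × String)) :
    pvInsertP s (a ++ b) = pvInsertP (pvInsertP s a) b := by
  unfold pvInsertP; rw [List.foldl_append]

lemma pvInsertP_shift (l : List (Int × String)) (x y : List Char)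
    (h : ∀ e ∈ l, 0 ≤ e.1 ∧ e.1 ≤ (x.length : Int)) :
    pvInsertP (x ++ y) l = pvInsertP x l ++ y := by
  induction l generalizing x with
  | nil => rfl
  | cons e es ih =>
    have he := h e (by simp)
    have hn : e.1.toNat ≤ x.length := by omega
    rw [pvInsertP_cons, pvInsertP_cons]
    rw [PySem.List.slice_to _ he.1, PySem.List.slice_to _ he.1,
      PySem.List.slice_from _ he.1, PySem.List.slice_from _ he.1]
    rw [List.take_append_of_le_length hn, List.drop_append_of_le_length hn]
    have : x.take e.1.toNat ++ pvAnnot e.2 ++ (x.drop e.1.toNat ++ y)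
        = (x.take e.1.toNat ++ pvAnnot e.2 ++ x.drop e.1.toNat) ++ y := by
      simp [List.append_assoc]
    rw [this]
    apply ih
    intro e' he'
    have h' := h e' (by simp [he'])
    have : (x.take e.1.toNat ++ pvAnnot e.2 ++ x.drop e.1.toNat).length
        = x.length + (pvAnnot e.2).length := by
      simp [List.length_append, List.length_take, List.length_drop]
      omega
    rw [this]
    constructor
    · exact h'.1
    · push_cast
      omega

lemma pvInsertP_block (g : List (Int × String)) (q : Int) (s rest : List Char)
    (hg : ∀ e ∈ g, e.1 = q) (h0 : 0 ≤ q) (hq : q.toNat ≤ s.length) :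
    pvInsertP (s.take q.toNat ++ rest) g = s.take q.toNat ++ pvAnnots g ++ rest := by
  induction g generalizing rest with
  | nil => simp [pvInsertP, pvAnnots]
  | cons e es ih =>
    have he1 : e.1 = q := hg e (by simp)
    have htl : (s.take q.toNat).length = q.toNat := by
      simp [List.length_take]
      omega
    have he0 : 0 ≤ e.1 := by rw [he1]; exact h0
    rw [pvInsertP_cons]
    rw [PySem.List.slice_to _ he0, PySem.List.slice_from _ he0, he1]
    rw [List.take_left' htl, List.drop_left' htl]
    rw [show s.take q.toNat ++ pvAnnot e.2 ++ rest = s.take q.toNat ++ (pvAnnot e.2 ++ rest) from by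
      simp [List.append_assoc]]
    rw [ih (pvAnnot e.2 ++ rest) (fun e' he' => hg e' (by simp [he']))]
    unfold pvAnnots
    simp [List.append_assoc]

lemma pvInsert_canon (P : List (Int × String)) (D : List Int) (s : List Char)
    (hD : D.Pairwise (· > ·)) (hb : ∀ q ∈ D, 0 ≤ q ∧ q.toNat ≤ s.length) :
    pvInsertP s (pvG P D) = pvCanon P s D := by
  induction D generalizing s with
  | nil => rfl
  | cons q D ih =>
    have hq := hb q (by simp)
    have hlt : ∀ r ∈ D, r < q := fun r hr => (List.pairwise_cons.1 hD).1 r hr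
    have hgrp : ∀ e ∈ pvGrp P q, e.1 = q := fun e he => (pvMem_pvGrp he).1
    show pvInsertP s (pvGrp P q ++ pvG P D) = _
    rw [pvInsertP_append]
    have hsplit : pvInsertP s (pvGrp P q)
        = s.take q.toNat ++ pvAnnots (pvGrp P q) ++ s.drop q.toNat := by
      conv_lhs => rw [← List.take_append_drop q.toNat s]
      exact pvInsertP_block _ q s _ hgrp hq.1 hq.2
    rw [hsplit]
    have hxlen : (s.take q.toNat).length = q.toNat := by
      simp [List.length_take]; omega
    have hshift : pvInsertP (s.take q.toNat ++ (pvAnnots (pvGrp P q) ++ s.drop q.toNat)) (pvG P D)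
        = pvInsertP (s.take q.toNat) (pvG P D) ++ (pvAnnots (pvGrp P q) ++ s.drop q.toNat) := by
      apply pvInsertP_shift
      intro e he
      rcases pvMem_pvG he with ⟨r, hr, he1, _⟩
      have hrb := hb r (by simp [hr])
      have := hlt r hr
      rw [hxlen, he1]
      omega
    rw [show s.take q.toNat ++ pvAnnots (pvGrp P q) ++ s.drop q.toNat
        = s.take q.toNat ++ (pvAnnots (pvGrp P q) ++ s.drop q.toNat) from by simp [List.append_assoc]]
    rw [hshift]
    rw [ih _ hD.of_cons (fun r hr => by
      have hrb := hb r (by simp [hr])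
      have := hlt r hr
      rw [hxlen]
      constructor
      · exact hrb.1
      · omega)]
    show pvCanon P (s.take q.toNat) D ++ (pvAnnots (pvGrp P q) ++ s.drop q.toNat) = _
    simp [pvCanon, List.append_assoc]

-- ---- B's dict of groups ----
lemma pvDict_keys_insert (d : PySem.Dict Int (List String)) (k : Int) (v : List String) :
    (d.insert k v).keys = if k ∈ d.keys then d.keys else d.keys ++ [k] := by
  by_cases h : k ∈ d.keys
  · rw [if_pos h]
    have hc : d.contains k = true := by
      rcases List.mem_map.1 h with ⟨p, hp, hpk⟩
      simp only [PySem.Dict.contains, List.any_eq_true]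
      exact ⟨p, hp, by simp [hpk]⟩
    simp only [PySem.Dict.insert, hc, if_true, PySem.Dict.keys, List.map_map]
    apply List.map_congr_left
    intro p hp
    by_cases hpk : p.1 = k <;> simp [hpk]
  · rw [if_neg h]
    have hc : d.contains k = false := by
      simp only [PySem.Dict.contains, List.any_eq_false]
      intro p hp
      simp only [beq_iff_eq]
      intro hpk
      exact h (List.mem_map.2 ⟨p, hp, hpk⟩)
    simp [PySem.Dict.insert, hc, PySem.Dict.keys]

lemma pvGroups_keys_mem (P : List (Int × String)) :
    ∀ (d : PySem.Dict Int (List String)) (q : Int),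
      q ∈ (P.foldl (fun d e => d.insert e.1 (d.getD e.1 [] ++ [e.2])) d).keys
        ↔ q ∈ d.keys ∨ q ∈ P.map (fun e => e.1) := by
  induction P with
  | nil => simp
  | cons e es ih =>
    intro d q
    simp only [List.foldl_cons]
    rw [ih]
    rw [PySem.Dict.mem_keys_insert]
    simp only [List.map_cons, List.mem_cons]
    tauto

lemma pvGroups_keys_nodup (P : List (Int × String)) :
    ∀ (d : PySem.Dict Int (List String)), d.keys.Nodup →
      (P.foldl (fun d e => d.insert e.1 (d.getD e.1 [] ++ [e.2])) d).keys.Nodup := by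
  induction P with
  | nil => exact fun d h => h
  | cons e es ih =>
    intro d hd
    simp only [List.foldl_cons]
    apply ih
    rw [pvDict_keys_insert]
    split
    · exact hd
    · rename_i hnm
      rw [List.nodup_append]
      exact ⟨hd, List.nodup_singleton _, fun a ha b hb => by simp only [List.mem_singleton] at hb; exact fun hh => hnm ((hb ▸ hh : a = e.1) ▸ ha)⟩

lemma pvGroups_getD (P : List (Int × String)) (q : Int) :
    ∀ (d : PySem.Dict Int (List String)),
      (P.foldl (fun d e => d.insert e.1 (d.getD e.1 [] ++ [e.2])) d).getD q []
        = d.getD q [] ++ (pvGrp P q).map (fun e => e.2) := by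
  induction P with
  | nil => simp [pvGrp]
  | cons e es ih =>
    intro d
    simp only [List.foldl_cons]
    rw [ih]
    rw [PySem.Dict.getD_insert]
    unfold pvGrp
    by_cases h : e.1 = q
    · rw [if_pos h.symm, List.filter_cons_of_pos (by simp [h]), h]
      simp [List.append_assoc]
    · rw [if_neg (fun hh => h hh.symm), List.filter_cons_of_neg (by simp [h])]

lemma pvGroups_getD_empty (P : List (Int × String)) (q : Int) :
    (pvGroups P).getD q [] = (pvGrp P q).map (fun e => e.2) := by
  unfold pvGroups
  rw [pvGroups_getD]
  simp [PySem.Dict.getD_empty]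

lemma pvKs (P : List (Int × String)) :
    PySem.List.sorted (pvGroups P).keys (fun x => x) false = pvE P := by
  unfold pvE pvGroups
  apply PySem.List.sorted_eq_sorted_of_perm _ _ _ (fun a b h => h)
  rw [List.perm_ext_iff_of_nodup (pvGroups_keys_nodup P _ (by simp [PySem.Dict.keys, PySem.Dict.empty]))
    (PySem.List.nodup_dedup _)]
  intro a
  rw [pvGroups_keys_mem, PySem.List.mem_dedup]
  simp [PySem.Dict.keys, PySem.Dict.empty]

lemma pvE_rev (P : List (Int × String)) : pvDKeys P = (pvE P).reverse := by
  unfold pvDKeys pvE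
  apply PySem.List.sorted_rev_eq_of_perm_of_pairwise_gt
  · exact (List.reverse_perm _).trans (PySem.List.sorted_perm _ _ false)
  · rw [List.pairwise_reverse]
    have h := PySem.List.sorted_ofList_pairwise_lt (P.map (fun e => e.1))
    rw [← PySem.List.dedup_eq_ofList] at h
    exact h

lemma pvMem_pvE (P : List (Int × String)) (q : Int) :
    q ∈ pvE P ↔ q ∈ P.map (fun e => e.1) := by
  unfold pvE
  rw [PySem.List.mem_sorted, PySem.List.mem_dedup]

-- ---- B's forward pass ----
lemma pvAnnots_eq (g : List (Int × String)) :
    ((((g.map (fun e => e.2)).reverse).map pvAnnot)).flatten = pvAnnots g := by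
  unfold pvAnnots
  rw [← List.map_reverse, List.map_map]
  rfl

lemma pvFoldParts (P : List (Int × String)) (s : List Char) (E : List Int)
    (hE : ∀ q ∈ E, 0 ≤ q) :
    ∀ (parts : List (List Char)) (prev : Int), 0 ≤ prev →
      ((E.foldl (fun (st : List (List Char) × Int) p =>
          ((st.1 ++ [PySem.List.slice s (some st.2) (some p)])
            ++ ((pvGrp P p).map (fun e => e.2)).reverse.map pvAnnot, p)) (parts, prev)).1
        ++ [PySem.List.slice s
            (some ((E.foldl (fun (st : List (List Char) × Int) p =>
              ((st.1 ++ [PySem.List.slice s (some st.2) (some p)])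
                ++ ((pvGrp P p).map (fun e => e.2)).reverse.map pvAnnot, p)) (parts, prev)).2)) none]).flatten
      = parts.flatten ++ pvCanonAsc P s prev E := by
  induction E with
  | nil =>
    intro parts prev hprev
    simp only [List.foldl_nil]
    rw [PySem.List.slice_from _ hprev]
    simp [pvCanonAsc]
  | cons q E ih =>
    intro parts prev hprev
    have hq := hE q (by simp)
    simp only [List.foldl_cons]
    rw [ih (fun r hr => hE r (by simp [hr])) _ q hq]
    rw [PySem.List.slice_toNat _ hprev hq]
    simp only [List.flatten_append, List.flatten]
    rw [pvAnnots_eq]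
    simp [pvCanonAsc, List.append_assoc]

lemma pvBuildB_eq (s : List Char) (P : List (Int × String)) (hP : ∀ e ∈ P, 0 ≤ e.1) :
    pvBuildB s (pvGroups P) = pvCanonAsc P s 0 (pvE P) := by
  unfold pvBuildB
  simp only [pvKs, pvGroups_getD_empty, PySem.List.foldl_append_singleton_eq_map]
  have hE : ∀ q ∈ pvE P, 0 ≤ q := by
    intro q hq
    rcases List.mem_map.1 ((pvMem_pvE P q).1 hq) with ⟨e, he, hq'⟩
    exact hq' ▸ hP e he
  have := pvFoldParts P s (pvE P) hE [] 0 le_rfl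
  simpa using this

-- ---- descending canonical = ascending canonical ----
lemma pvCanonAsc_snoc (P : List (Int × String)) (s : List Char) (E : List Int) (q : Int) :
    ∀ (prev : Int), (∀ r ∈ E, r < q) → (prev :: E).Pairwise (· ≤ ·) → 0 ≤ prev → prev ≤ q →
    q.toNat ≤ s.length →
    pvCanonAsc P s prev (E ++ [q])
    = pvCanonAsc P (s.take q.toNat) prev E ++ pvAnnots (pvGrp P q) ++ s.drop q.toNat := by
  induction E with
  | nil =>
    intro prev _ _ h0 hpq hq
    simp only [List.nil_append, pvCanonAsc]
    rw [List.drop_take]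
  | cons r E ih =>
    intro prev hlt hpw h0 hpq hq
    have hpr : prev ≤ r := (List.pairwise_cons.1 hpw).1 r (by simp)
    have hrq : r < q := hlt r (by simp)
    simp only [List.cons_append, pvCanonAsc]
    rw [ih r (fun r' hr' => hlt r' (by simp [hr'])) hpw.of_cons (le_trans h0 hpr) hrq.le hq]
    have hpiece : ((s.take q.toNat).drop prev.toNat).take (r.toNat - prev.toNat)
        = (s.drop prev.toNat).take (r.toNat - prev.toNat) := by
      rw [List.drop_take, List.take_take]
      congr 1
      omega
    rw [hpiece]
    simp [List.append_assoc]

lemma pvCanon_eq_asc (P : List (Int × String)) (D : List Int) (s : List Char)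
    (hD : D.Pairwise (· > ·)) (hb : ∀ q ∈ D, 0 ≤ q ∧ q.toNat ≤ s.length) :
    pvCanon P s D = pvCanonAsc P s 0 D.reverse := by
  induction D generalizing s with
  | nil => simp [pvCanon, pvCanonAsc]
  | cons q D ih =>
    have hq := hb q (by simp)
    have hlt : ∀ r ∈ D, r < q := fun r hr => (List.pairwise_cons.1 hD).1 r hr
    have hxlen : (s.take q.toNat).length = q.toNat := by
      simp [List.length_take]; omega
    show pvCanon P (s.take q.toNat) D ++ pvAnnots (pvGrp P q) ++ s.drop q.toNat = _
    rw [List.reverse_cons]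
    rw [pvCanonAsc_snoc P s D.reverse q 0
      (fun r hr => hlt r (List.mem_reverse.1 hr))
      (List.pairwise_cons.2 ⟨fun r hr => (hb r (by simp [List.mem_reverse.1 hr])).1,
        (List.pairwise_reverse.2 (hD.of_cons.imp (fun {a b} h => le_of_lt h)))⟩)
      le_rfl hq.1 hq.2]
    rw [ih _ hD.of_cons (fun r hr => by
      have hrb := hb r (by simp [hr])
      have := hlt r hr
      rw [hxlen]
      exact ⟨hrb.1, by omega⟩)]

-- ---- assembly ----
lemma pvA_core (s : List Char) (ev : List (List (String × String))) :
    pvInsertA s (PySem.List.sorted (pvCollectA s ev) (fun x => x.1) true)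
    = pvCanonAsc (pvCollectB s ev) s 0 (pvE (pvCollectB s ev)) := by
  set P := pvCollectB s ev with hPdef
  have hbounds := pvCollectB_bounds s ev
  have hDb : ∀ q ∈ pvDKeys P, 0 ≤ q ∧ q.toNat ≤ s.length := by
    intro q hq
    rcases List.mem_map.1 ((pvMem_pvDKeys P q).1 hq) with ⟨e, he, hq'⟩
    have := hbounds e he
    subst hq'
    constructor
    · exact this.1
    · omega
  rw [pvInsertA_eq_P, pvSorted_map, pvCollect_rel]
  rw [← hPdef, pvStable, pvInsert_canon P _ s (pvDKeys_pairwise P) hDb,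
    pvCanon_eq_asc P _ s (pvDKeys_pairwise P) hDb, pvE_rev, List.reverse_reverse]

lemma pvB_core (s : List Char) (ev : List (List (String × String))) :
    pvBuildB s (pvGroups (pvCollectB s ev))
    = pvCanonAsc (pvCollectB s ev) s 0 (pvE (pvCollectB s ev)) := by
  exact pvBuildB_eq s _ (fun e he => (pvCollectB_bounds s ev e he).1)

-- ===== VERDICT (by name: the statement is the Claim_ definition above) =====
theorem format_sentence_with_annotations_spec : Claim_equal_format_sentence_with_annotations := by
  intro sentence emotion tone sound_events _
  unfold Spec_format_sentence_with_annotations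
  unfold format_sentence_with_annotations format_sentence_with_annotations_alt
  by_cases hev : sound_events = []
  · subst hev
    simp only [ne_eq, not_true_eq_false, if_false]
    congr 1
    congr 1
    rw [pvB_core]
    show _ = pvCanonAsc [] sentence.toList 0 (pvE [])
    rfl
  · simp only [ne_eq, hev, not_false_eq_true, if_true]
    congr 1
    congr 1
    rw [pvA_core, pvB_core]
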